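-- pv_equiv track=rewrite | github.com/JamesShaw777/crypto-stock-alert | scripts/market_alert.py | find_recent_pivot_pair
-- ===== SOURCE A (Python) =====
-- def find_recent_pivot_pair(indices: list[int], min_gap: int, max_gap: int, max_age: int, last_idx: int) -> tuple[int, int] | None:
--     if len(indices) < 2:
--         return None
--
--     for j in range(len(indices) - 1, 0, -1):
--         p2 = indices[j]
--         if last_idx - p2 > max_age:
--             continue
--         for i in range(j - 1, -1, -1):
--             p1 = indices[i]
--             gap = p2 - p1
--             if gap < min_gap:
--                 continue
--             if gap > max_gap:
--                 break
--             return p1, p2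
--     return None
-- ===== SOURCE B (Python) =====
-- def find_recent_pivot_pair(indices: list[int], min_gap: int, max_gap: int, max_age: int, last_idx: int) -> tuple[int, int] | None:
--     # For each candidate p2 (newest first, within max_age), the rightmost earlier
--     # pivot with gap >= min_gap is the last element of a filtered prefix; the
--     # pair qualifies iff that element also satisfies gap <= max_gap.
--     for j in range(len(indices) - 1, 0, -1):
--         p2 = indices[j]
--         if last_idx - p2 > max_age:
--             continue
--         cands = [p1 for p1 in indices[:j] if p2 - p1 >= min_gap]
--         if cands and p2 - cands[-1] <= max_gap:
--             return cands[-1], p2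
--     return None
-- ===== Notes on version B (the rewrite author's own statement) =====
-- stated objective: simpler
-- what changed: B drops the len<2 guard and replaces A's inner descending scan with its continue/break/return control flow by a prefix filter (pivots with gap >= min_gap) followed by a single max_gap check on the last filtered element.
import Mathlib
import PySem

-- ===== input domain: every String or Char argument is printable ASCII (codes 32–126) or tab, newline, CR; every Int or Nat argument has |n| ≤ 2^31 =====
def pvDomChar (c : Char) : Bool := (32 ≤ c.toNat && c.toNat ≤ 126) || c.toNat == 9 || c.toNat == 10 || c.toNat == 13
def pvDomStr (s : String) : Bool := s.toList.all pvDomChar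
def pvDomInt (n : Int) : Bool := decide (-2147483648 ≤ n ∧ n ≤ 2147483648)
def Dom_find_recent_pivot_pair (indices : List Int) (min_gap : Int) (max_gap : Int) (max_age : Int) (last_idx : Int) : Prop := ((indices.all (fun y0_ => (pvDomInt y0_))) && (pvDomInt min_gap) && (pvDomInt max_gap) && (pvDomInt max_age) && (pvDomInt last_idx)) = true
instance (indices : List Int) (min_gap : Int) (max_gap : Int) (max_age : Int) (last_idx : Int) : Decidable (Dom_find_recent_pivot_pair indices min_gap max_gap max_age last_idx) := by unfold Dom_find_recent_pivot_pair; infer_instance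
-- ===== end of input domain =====

-- B replaces A's inner break/continue scan by a filter of the prefix followed by
-- one check on its last element (objective: simpler); same asymptotic cost.

-- ===== PORT A =====
-- inner loop of A: i runs from k-1 down to 0 (fuel k = number of remaining iterations)
def pvInnerA (indices : List Int) (p2 min_gap max_gap : Int) : Nat → Option (Int × Int)
  | 0 => none
  | k + 1 =>
    let p1 := indices.getD k 0
    let gap := p2 - p1
    if gap < min_gap then pvInnerA indices p2 min_gap max_gap k
    else if gap > max_gap then none
    else some (p1, p2)

-- outer loop of A: current index is j+1, runs down to 1
def pvOuterA (indices : List Int) (min_gap max_gap max_age last_idx : Int) : Nat → Option (Int × Int)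
  | 0 => none
  | j + 1 =>
    let p2 := indices.getD (j + 1) 0
    if last_idx - p2 > max_age then pvOuterA indices min_gap max_gap max_age last_idx j
    else
      match pvInnerA indices p2 min_gap max_gap (j + 1) with
      | some r => some r
      | none => pvOuterA indices min_gap max_gap max_age last_idx j

def find_recent_pivot_pair (indices : List Int) (min_gap : Int) (max_gap : Int) (max_age : Int) (last_idx : Int) : Option (Int × Int) :=
  if indices.length < 2 then none
  else pvOuterA indices min_gap max_gap max_age last_idx (indices.length - 1)

-- ===== PORT B =====
def pvOuterB (indices : List Int) (min_gap max_gap max_age last_idx : Int) : Nat → Option (Int × Int)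
  | 0 => none
  | j + 1 =>
    let p2 := indices.getD (j + 1) 0
    if last_idx - p2 > max_age then pvOuterB indices min_gap max_gap max_age last_idx j
    else
      let cands := (indices.take (j + 1)).filter (fun p1 => decide (p2 - p1 ≥ min_gap))
      match cands.getLast? with
      | some c =>
        if p2 - c ≤ max_gap then some (c, p2)
        else pvOuterB indices min_gap max_gap max_age last_idx j
      | none => pvOuterB indices min_gap max_gap max_age last_idx j

def find_recent_pivot_pair_alt (indices : List Int) (min_gap : Int) (max_gap : Int) (max_age : Int) (last_idx : Int) : Option (Int × Int) :=
  pvOuterB indices min_gap max_gap max_age last_idx (indices.length - 1)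

-- ===== PRECONDITION & SPEC =====
def Spec_find_recent_pivot_pair (indices : List Int) (min_gap : Int) (max_gap : Int) (max_age : Int) (last_idx : Int) (out : Option (Int × Int)) : Prop := out = find_recent_pivot_pair_alt indices min_gap max_gap max_age last_idx
instance (indices : List Int) (min_gap : Int) (max_gap : Int) (max_age : Int) (last_idx : Int) (out : Option (Int × Int)) : Decidable (Spec_find_recent_pivot_pair indices min_gap max_gap max_age last_idx out) := by unfold Spec_find_recent_pivot_pair; infer_instance

-- ===== CLAIM (what is proved, stated in full; the proofs are below) =====
def Claim_equal_find_recent_pivot_pair : Prop := ∀ (indices : List Int) (min_gap : Int) (max_gap : Int) (max_age : Int) (last_idx : Int), Dom_find_recent_pivot_pair indices min_gap max_gap max_age last_idx → Spec_find_recent_pivot_pair indices min_gap max_gap max_age last_idx (find_recent_pivot_pair indices min_gap max_gap max_age last_idx)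

-- ===== LEMMAS AND PROOFS =====

-- A's descending inner scan finds the last element of the filtered prefix.
theorem pvInner_eq_filter (indices : List Int) (p2 min_gap max_gap : Int) :
    ∀ k : Nat, k ≤ indices.length →
      pvInnerA indices p2 min_gap max_gap k =
        match ((indices.take k).filter (fun p1 => decide (p2 - p1 ≥ min_gap))).getLast? with
        | some c => if p2 - c ≤ max_gap then some (c, p2) else none
        | none => none := by
  intro k
  induction k with
  | zero => intro _; simp [pvInnerA]
  | succ k ih =>
    intro hk
    have hk' : k < indices.length := Nat.lt_of_succ_le hk
    have hget : indices[k]? = some (indices.getD k 0) := by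
      simp [List.getD_eq_getElem?_getD, List.getElem?_eq_getElem hk']
    have htake : indices.take (k + 1) = indices.take k ++ [indices.getD k 0] := by
      rw [List.take_add_one, hget]; rfl
    rw [pvInnerA, htake, List.filter_append]
    by_cases hmg : p2 - indices.getD k 0 < min_gap
    · have hd : decide (p2 - indices.getD k 0 ≥ min_gap) = false := by
        simp only [decide_eq_false_iff_not]; omega
      simp only [List.filter_cons, List.filter_nil, hd, Bool.false_eq_true, if_false,
        List.append_nil, hmg, if_true]
      exact ih (Nat.le_of_lt hk')
    · have hd : decide (p2 - indices.getD k 0 ≥ min_gap) = true := by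
        simp only [decide_eq_true_iff]; omega
      simp only [List.filter_cons, List.filter_nil, hd, if_true, hmg, if_false,
        List.getLast?_concat]
      by_cases hM : p2 - indices.getD k 0 > max_gap
      · rw [if_pos hM, if_neg (by omega)]
      · rw [if_neg hM, if_pos (by omega)]

theorem pvOuter_eq (indices : List Int) (min_gap max_gap max_age last_idx : Int) :
    ∀ j : Nat, j + 1 ≤ indices.length →
      pvOuterA indices min_gap max_gap max_age last_idx j =
        pvOuterB indices min_gap max_gap max_age last_idx j := by
  intro j
  induction j with
  | zero => intro _; rfl
  | succ j ih =>
    intro hj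
    have hinner := pvInner_eq_filter indices (indices.getD (j + 1) 0) min_gap max_gap (j + 1)
      (Nat.le_of_succ_le hj)
    have ihj := ih (Nat.le_of_succ_le hj)
    rw [pvOuterA, pvOuterB]
    simp only [hinner, ihj]
    by_cases hage : last_idx - indices.getD (j + 1) 0 > max_age
    · rw [if_pos hage, if_pos hage]
    · rw [if_neg hage, if_neg hage]
      cases hl : ((indices.take (j + 1)).filter
          (fun p1 => decide (indices.getD (j + 1) 0 - p1 ≥ min_gap))).getLast? with
      | none => rfl
      | some c =>
        dsimp only
        by_cases hm : indices.getD (j + 1) 0 - c ≤ max_gap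
        · rw [if_pos hm, if_pos hm]
        · rw [if_neg hm, if_neg hm]

-- ===== VERDICT (by name: the statement is the Claim_ definition above) =====
theorem find_recent_pivot_pair_spec : Claim_equal_find_recent_pivot_pair := by
  intro indices min_gap max_gap max_age last_idx _
  unfold Spec_find_recent_pivot_pair find_recent_pivot_pair find_recent_pivot_pair_alt
  by_cases h : indices.length < 2
  · interval_cases h' : indices.length
    · have : indices = [] := List.eq_nil_of_length_eq_zero h'
      subst this; rfl
    · match indices, h' with
      | [a], _ => rfl
  · have : indices.length - 1 + 1 ≤ indices.length := by omega
    simp only [h, if_false]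
    exact pvOuter_eq indices min_gap max_gap max_age last_idx _ this
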